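-- pv_equiv track=rewrite | github.com/meta-introspector/retro-sync | fixtures/scripts/shamash_symmetry.py | cl15_blade
-- ===== SOURCE A (Python) =====
-- def cl15_blade(radial_bins):
--     """Compute Cl(15) blade from radial histogram."""
--     mv = {0: 1}
--     for i, count in enumerate(radial_bins):
--         if count == 0 or i >= 15: continue
--         blade = 1 << i
--         for _ in range(count % 2):
--             new = {}
--             for mask, coeff in mv.items():
--                 result = mask ^ blade
--                 sign = 1
--                 for bit in range(i):
--                     if mask & (1 << bit): sign *= -1
--                 new[result] = new.get(result, 0) + coeff * sign
--             mv = {k: v for k, v in new.items() if v != 0}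
--     if not mv: return 0, 0
--     top = max(mv.keys(), key=lambda k: abs(mv[k]))
--     return top, bin(top).count('1')
-- ===== SOURCE B (Python) =====
-- def cl15_blade(radial_bins):
--     """Compute Cl(15) blade from radial histogram."""
--     mask = 0
--     for i, count in enumerate(radial_bins):
--         if i < 15 and count % 2:
--             mask ^= 1 << i
--     return mask, bin(mask).count('1')
-- ===== Notes on version B (the rewrite author's own statement) =====
-- stated objective: simpler
-- what changed: B drops A's multivector dict, the +-1 coefficient tracking and the nested sign loop, and just XORs 1<<i into a single integer mask for every bin i<15 with an odd count, returning (mask, popcount).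
import Mathlib
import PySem

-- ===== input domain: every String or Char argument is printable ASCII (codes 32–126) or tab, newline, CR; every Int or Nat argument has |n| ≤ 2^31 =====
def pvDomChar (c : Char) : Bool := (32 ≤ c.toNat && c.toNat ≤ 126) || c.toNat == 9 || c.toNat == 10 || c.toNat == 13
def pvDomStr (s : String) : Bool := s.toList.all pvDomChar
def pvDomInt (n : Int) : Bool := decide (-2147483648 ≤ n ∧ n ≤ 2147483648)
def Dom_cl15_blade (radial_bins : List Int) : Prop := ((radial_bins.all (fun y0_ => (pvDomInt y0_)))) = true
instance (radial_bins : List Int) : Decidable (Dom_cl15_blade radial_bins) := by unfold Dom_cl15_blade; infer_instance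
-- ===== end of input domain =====

-- B drops A's multivector dict and ±1 sign bookkeeping: the resulting blade is just the XOR of 1<<i over odd bins with i<15 (objective: simpler).

-- ===== PORT A =====
-- one multiplication step of the inner 'for _ in range(count % 2)' loop (dict comprehension = rebuild by insertion order)
def pvStepA (i : Int) (blade : Int) (mv : PySem.Dict Int Int) : PySem.Dict Int Int :=
  let new := mv.items.foldl (fun new p =>
    let result := PySem.Int.bxor p.1 blade
    let sign := (PySem.List.pyRange 0 i 1).foldl (fun sign bit =>
      -- 'mask & (1 << bit)': bit ∈ [0,i) is nonnegative, so '.toNat' is exact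
      if PySem.Int.band p.1 ((1:Int) <<< bit.toNat) ≠ 0 then sign * (-1) else sign) (1:Int)
    new.insert result (new.getD result 0 + p.2 * sign)) (PySem.Dict.empty : PySem.Dict Int Int)
  PySem.Dict.ofList (new.items.filter (fun p => p.2 != 0))

def cl15_blade (radial_bins : List Int) : Int × Int :=
  let mv := (PySem.List.enumerate radial_bins 0).foldl (fun (mv : PySem.Dict Int Int) (ic : Int × Int) =>
    if ic.2 = 0 ∨ (15:Int) ≤ ic.1 then mv
    else
      -- 'blade = 1 << i': the enumeration index is nonnegative, so '.toNat' is exact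
      (PySem.List.pyRange 0 (PySem.Int.mod ic.2 2) 1).foldl
        (fun mv _ => pvStepA ic.1 ((1:Int) <<< ic.1.toNat) mv) mv)
    ((PySem.Dict.empty : PySem.Dict Int Int).insert 0 1)
  if mv.items = [] then (0, 0)
  else
    -- max over the nonempty key list; the '.getD 0' default is unreachable
    let top := (PySem.List.max? mv.keys (fun k => (mv.getD k 0).natAbs)).getD 0
    (top, (PySem.Str.count (PySem.Int.pyBin top) "1" : Int))

-- ===== PORT B =====
def cl15_blade_alt (radial_bins : List Int) : Int × Int :=
  let mask := (PySem.List.enumerate radial_bins 0).foldl (fun (mask : Int) (ic : Int × Int) =>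
    if ic.1 < 15 ∧ PySem.Int.mod ic.2 2 ≠ 0 then PySem.Int.bxor mask ((1:Int) <<< ic.1.toNat)
    else mask) (0:Int)
  (mask, (PySem.Str.count (PySem.Int.pyBin mask) "1" : Int))

-- ===== PRECONDITION & SPEC =====
def Spec_cl15_blade (radial_bins : List Int) (out : Int × Int) : Prop := out = cl15_blade_alt radial_bins
instance (radial_bins : List Int) (out : Int × Int) : Decidable (Spec_cl15_blade radial_bins out) := by unfold Spec_cl15_blade; infer_instance

-- ===== CLAIM (what is proved, stated in full; the proofs are below) =====
def Claim_equal_cl15_blade : Prop := ∀ (radial_bins : List Int), Dom_cl15_blade radial_bins → Spec_cl15_blade radial_bins (cl15_blade radial_bins)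

-- ===== LEMMAS AND PROOFS =====

-- the sign accumulator stays ±1 through the 'for bit in range(i)' loop
theorem pv_sign_pm (l : List Int) (m : Int) (s : Int) (hs : s = 1 ∨ s = -1) :
    (l.foldl (fun sign bit =>
      if PySem.Int.band m ((1:Int) <<< bit.toNat) ≠ 0 then sign * (-1) else sign) s) = 1 ∨
    (l.foldl (fun sign bit =>
      if PySem.Int.band m ((1:Int) <<< bit.toNat) ≠ 0 then sign * (-1) else sign) s) = -1 := by
  induction l generalizing s with
  | nil => simpa using hs
  | cons b t ih =>
    simp only [List.foldl_cons]
    apply ih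
    rcases hs with h | h <;> rw [h] <;> split_ifs <;> norm_num

-- one multiplication step sends a singleton dict to a singleton dict with xored key and ±1 coefficient
theorem pv_stepA_singleton (i blade m c : Int) (hc : c = 1 ∨ c = -1) :
    ∃ c', (c' = 1 ∨ c' = -1) ∧
      pvStepA i blade (PySem.Dict.mk [(m, c)]) = PySem.Dict.mk [(PySem.Int.bxor m blade, c')] := by
  have hs := pv_sign_pm (PySem.List.pyRange 0 i 1) m 1 (Or.inl rfl)
  refine ⟨c * ((PySem.List.pyRange 0 i 1).foldl (fun sign bit =>
      if PySem.Int.band m ((1:Int) <<< bit.toNat) ≠ 0 then sign * (-1) else sign) (1:Int)), ?_, ?_⟩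
  · rcases hc with h | h <;> rcases hs with h2 | h2 <;> rw [h, h2] <;> norm_num
  · have hne : c * ((PySem.List.pyRange 0 i 1).foldl (fun sign bit =>
        if PySem.Int.band m ((1:Int) <<< bit.toNat) ≠ 0 then sign * (-1) else sign) (1:Int)) ≠ 0 := by
      rcases hc with h | h <;> rcases hs with h2 | h2 <;> rw [h, h2] <;> norm_num
    unfold pvStepA
    simp [PySem.Dict.insert, PySem.Dict.contains, PySem.Dict.empty,
      PySem.Dict.getD, PySem.Dict.get?, PySem.Dict.ofList, PySem.Dict.update] at hne ⊢
    simp [hne]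

-- loop invariant: A's fold keeps a singleton dict whose key is B's running mask
theorem pv_loop (l : List (Int × Int)) (m c : Int) (hc : c = 1 ∨ c = -1) :
    ∃ c', (c' = 1 ∨ c' = -1) ∧
      l.foldl (fun (mv : PySem.Dict Int Int) (ic : Int × Int) =>
        if ic.2 = 0 ∨ (15:Int) ≤ ic.1 then mv
        else (PySem.List.pyRange 0 (PySem.Int.mod ic.2 2) 1).foldl
          (fun mv _ => pvStepA ic.1 ((1:Int) <<< ic.1.toNat) mv) mv) (PySem.Dict.mk [(m, c)])
      = PySem.Dict.mk [(l.foldl (fun (mask : Int) (ic : Int × Int) =>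
          if ic.1 < 15 ∧ PySem.Int.mod ic.2 2 ≠ 0 then PySem.Int.bxor mask ((1:Int) <<< ic.1.toNat)
          else mask) m, c')] := by
  induction l generalizing m c with
  | nil => exact ⟨c, hc, rfl⟩
  | cons p t ih =>
    simp only [List.foldl_cons]
    by_cases h1 : p.2 = 0 ∨ (15:Int) ≤ p.1
    · rw [if_pos h1]
      have hB : ¬ (p.1 < 15 ∧ PySem.Int.mod p.2 2 ≠ 0) := by
        rintro ⟨hlt, hm⟩
        rcases h1 with h | h
        · exact hm (by rw [h]; decide)
        · omega
      rw [if_neg hB]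
      exact ih m c hc
    · rw [if_neg h1]
      have hmod : PySem.Int.mod p.2 2 = 0 ∨ PySem.Int.mod p.2 2 = 1 := by
        have h1' := PySem.Int.mod_nonneg p.2 (b := 2) (by norm_num)
        have h2' := PySem.Int.mod_lt p.2 (b := 2) (by norm_num)
        omega
      rcases hmod with h0 | h01
      · rw [h0]
        have hr : PySem.List.pyRange 0 0 1 = [] := by decide
        rw [hr, List.foldl_nil]
        rw [if_neg (by rintro ⟨_, hm⟩; exact hm rfl)]
        exact ih m c hc
      · rw [h01]
        have hr : PySem.List.pyRange 0 1 1 = [0] := by decide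
        rw [hr, List.foldl_cons, List.foldl_nil]
        obtain ⟨c2, hc2, hstep⟩ := pv_stepA_singleton p.1 ((1:Int) <<< p.1.toNat) m c hc
        rw [hstep]
        rw [if_pos ⟨by omega, one_ne_zero⟩]
        exact ih _ c2 hc2

-- ===== VERDICT (by name: the statement is the Claim_ definition above) =====
theorem cl15_blade_spec : Claim_equal_cl15_blade := by
  intro radial_bins _
  unfold Spec_cl15_blade cl15_blade cl15_blade_alt
  obtain ⟨c', hc', heq⟩ := pv_loop (PySem.List.enumerate radial_bins 0) 0 1 (Or.inl rfl)
  have hinit : ((PySem.Dict.empty : PySem.Dict Int Int).insert 0 1) = PySem.Dict.mk [(0, 1)] := rfl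
  simp only [hinit, heq, PySem.Dict.keys, PySem.Dict.getD, PySem.Dict.get?]
  simp [PySem.List.max?]
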